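-- pv_equiv track=rewrite | github.com/permCoding/ege-21-22 | days/2022-04-30/14-1.py | fb
-- ===== SOURCE A (Python) =====
-- def fb(base=8):
--     n = 7 * 512**1912 + \
--         6 * 64**1994 - \
--         5 * 8**1991 - \
--         4 * 8**1960 - 2022
--     cnt = 0
--     while n > 0:
--         if n%base==7: cnt += 1
--         n //= base
--     return cnt
-- ===== SOURCE B (Python) =====
-- def fb(base=8):
--     n = 7 * 512**1912 + \
--         6 * 64**1994 - \
--         5 * 8**1991 - \
--         4 * 8**1960 - 2022
--     if base < 8:
--         # for small positive bases every digit is below seven, and for a negative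
--         # base the single non-negative step's remainder is <= 0: the count is 0
--         return 0
--     # descending chain of powers base^(2^k), ..., base^2, base
--     pows = [base]
--     while pows[0] * pows[0] <= n:
--         pows = [pows[0] * pows[0]] + pows
--     def cnt(m, ps):
--         # number of base-`base` digits of m equal to 7 (m < ps[0]**2 throughout)
--         if not ps:
--             return 1 if m == 7 else 0
--         p, rest = ps[0], ps[1:]
--         if m < p:
--             return cnt(m, rest)
--         return cnt(m // p, rest) + cnt(m % p, rest)
--     return cnt(n, pows)
-- ===== Notes on version B (the rewrite author's own statement) =====
-- stated objective: faster
-- what changed: Replaces the one-bigint-division-per-digit while loop by divide-and-conquer base splitting over a chain of squared powers base^(2^k), plus the observation that no digit can equal seven for bases below eight.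
-- outside the precondition, e.g. on fb(0): A raises ZeroDivisionError, B returns 0; on fb(1): A does not finish within the time limit, B returns 0
import Mathlib
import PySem

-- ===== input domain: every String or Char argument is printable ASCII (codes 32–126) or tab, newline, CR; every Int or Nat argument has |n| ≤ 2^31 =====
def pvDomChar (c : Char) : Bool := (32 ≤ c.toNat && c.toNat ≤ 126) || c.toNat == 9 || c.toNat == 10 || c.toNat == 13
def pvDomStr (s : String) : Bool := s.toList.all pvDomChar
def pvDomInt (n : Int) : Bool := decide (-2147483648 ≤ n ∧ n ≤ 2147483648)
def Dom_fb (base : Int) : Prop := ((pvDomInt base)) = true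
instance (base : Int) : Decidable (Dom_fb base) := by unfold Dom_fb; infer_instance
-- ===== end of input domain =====

-- B replaces A's one-division-per-digit while loop by divide-and-conquer base splitting
-- over squared powers (and returns 0 directly for small bases, where no digit can be seven): faster.


-- the fixed big number both programs digit-count (shared literal constant)
def pvN : Int := 7 * 512 ^ 1912 + 6 * 64 ^ 1994 - 5 * 8 ^ 1991 - 4 * 8 ^ 1960 - 2022

-- ===== PORT A =====
-- A's `while n > 0` loop; the fuel pvN.toNat + 1 is a totality guard only (the loop
-- strictly shrinks n.toNat whenever it terminates in Python)
def fbLoop (base : Int) : Nat → Int → Int → Int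
  | 0, _, cnt => cnt
  | fuel + 1, n, cnt =>
    if 0 < n then
      fbLoop base fuel (PySem.Int.floordiv n base)
        (if PySem.Int.mod n base = 7 then cnt + 1 else cnt)
    else cnt

def fb (base : Int) : Int := fbLoop base (pvN.toNat + 1) pvN 0

-- ===== PORT B =====
-- `while pows[0] * pows[0] <= n: pows = [pows[0]*pows[0]] + pows`; fuel 64 is a totality
-- guard only (the head squares each round, so 64 rounds always suffice for pvN)
def buildPows (n : Int) : Nat → Int → List Int → List Int
  | 0, _, acc => acc
  | f + 1, p, acc => if p * p ≤ n then buildPows n f (p * p) (p * p :: acc) else acc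

def cntAlt : Int → List Int → Int
  | m, [] => if m = 7 then 1 else 0
  | m, p :: ps =>
    if m < p then cntAlt m ps
    else cntAlt (PySem.Int.floordiv m p) ps + cntAlt (PySem.Int.mod m p) ps

def fb_alt (base : Int) : Int :=
  if base < 8 then 0
  else cntAlt pvN (buildPows pvN 64 base [base])

-- ===== PRECONDITION & SPEC =====
-- Pre_ excludes base = 0 (A raises ZeroDivisionError) and base = 1 (A's loop never terminates).
def Pre_fb (base : Int) : Prop := base ≠ 0 ∧ base ≠ 1
instance (base : Int) : Decidable (Pre_fb base) := by unfold Pre_fb; infer_instance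
def pvWitness_fb : Int := 8

def Spec_fb (base : Int) (out : Int) : Prop := out = fb_alt base
instance (base : Int) (out : Int) : Decidable (Spec_fb base out) := by unfold Spec_fb; infer_instance

-- ===== CLAIM (what is proved, stated in full; the proofs are below) =====
def Claim_equal_fb : Prop := ∀ (base : Int), Dom_fb base → Pre_fb base → Spec_fb base (fb base)

-- ===== LEMMAS AND PROOFS =====

-- A's loop value from a fresh counter, with exactly enough fuel
def pvC (base n : Int) : Int := fbLoop base (n.toNat + 1) n 0

lemma fbLoop_nonpos (base : Int) (f : Nat) (n cnt : Int) (h : ¬ 0 < n) :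
    fbLoop base f n cnt = cnt := by
  cases f <;> simp [fbLoop, h]

lemma fbLoop_acc (base : Int) (f : Nat) : ∀ n cnt : Int,
    fbLoop base f n cnt = cnt + fbLoop base f n 0 := by
  induction f with
  | zero => intro n cnt; simp [fbLoop]
  | succ f ih =>
    intro n cnt
    by_cases h : 0 < n
    · simp only [fbLoop, if_pos h]
      rw [ih (PySem.Int.floordiv n base) (if PySem.Int.mod n base = 7 then cnt + 1 else cnt),
          ih (PySem.Int.floordiv n base) (if PySem.Int.mod n base = 7 then 0 + 1 else 0)]
      split_ifs <;> ring
    · simp [fbLoop, h]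

lemma fdiv_shrink (base : Int) (hb : 2 ≤ base) (n : Int) (hn : 0 < n) :
    0 ≤ PySem.Int.floordiv n base ∧ (PySem.Int.floordiv n base).toNat < n.toNat := by
  rw [PySem.Int.floordiv_eq_ediv_of_pos (by omega)]
  have h1 : 0 ≤ n / base := Int.ediv_nonneg (by omega) (by omega)
  have h2 : n / base < n := Int.ediv_lt_of_lt_mul (by omega) (by nlinarith)
  exact ⟨h1, by omega⟩

lemma fbLoop_fuel (base : Int) (hb : 2 ≤ base) : ∀ (k : Nat) (n : Int), n.toNat ≤ k →
    ∀ f g : Nat, n.toNat < f → n.toNat < g → fbLoop base f n 0 = fbLoop base g n 0 := by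
  intro k
  induction k with
  | zero =>
    intro n hk f g hf hg
    by_cases h : 0 < n
    · omega
    · rw [fbLoop_nonpos base f n 0 h, fbLoop_nonpos base g n 0 h]
  | succ k ih =>
    intro n hk f g hf hg
    by_cases h : 0 < n
    · obtain ⟨f', rfl⟩ : ∃ f', f = f' + 1 := ⟨f - 1, by omega⟩
      obtain ⟨g', rfl⟩ : ∃ g', g = g' + 1 := ⟨g - 1, by omega⟩
      simp only [fbLoop, if_pos h]
      rw [fbLoop_acc, fbLoop_acc base g']
      obtain ⟨h0, hlt⟩ := fdiv_shrink base hb n h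
      rw [ih (PySem.Int.floordiv n base) (by omega) f' g' (by omega) (by omega)]
    · rw [fbLoop_nonpos base f n 0 h, fbLoop_nonpos base g n 0 h]

lemma pvC_nonpos (base n : Int) (h : ¬ 0 < n) : pvC base n = 0 :=
  fbLoop_nonpos base _ n 0 h

lemma fbLoop_step (base : Int) (f : Nat) (n : Int) (hn : 0 < n) :
    fbLoop base (f + 1) n 0 = (if PySem.Int.mod n base = 7 then 1 else 0) +
      fbLoop base f (PySem.Int.floordiv n base) 0 := by
  simp only [fbLoop, if_pos hn]
  rw [fbLoop_acc]
  split_ifs <;> ring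

lemma pvC_step (base : Int) (hb : 2 ≤ base) (n : Int) (hn : 0 < n) :
    pvC base n = (if PySem.Int.mod n base = 7 then 1 else 0) +
      pvC base (PySem.Int.floordiv n base) := by
  unfold pvC
  rw [fbLoop_step base n.toNat n hn]
  obtain ⟨h0, hlt⟩ := fdiv_shrink base hb n hn
  rw [fbLoop_fuel base hb (PySem.Int.floordiv n base).toNat (PySem.Int.floordiv n base)
      le_rfl n.toNat ((PySem.Int.floordiv n base).toNat + 1) (by omega) (by omega)]

lemma pvC_small (base : Int) (hb : 2 ≤ base) (m : Int) (h0 : 0 ≤ m) (h1 : m < base) :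
    pvC base m = if m = 7 then 1 else 0 := by
  by_cases hm : 0 < m
  · rw [pvC_step base hb m hm]
    have hmod : PySem.Int.mod m base = m := by
      rw [PySem.Int.mod_eq_emod_of_pos (by omega)]
      exact Int.emod_eq_of_lt h0 h1
    have hdiv : PySem.Int.floordiv m base = 0 := by
      rw [PySem.Int.floordiv_eq_ediv_of_pos (by omega)]
      exact Int.ediv_eq_zero_of_lt h0 h1
    rw [hmod, hdiv, pvC_nonpos base 0 (by omega)]
    ring
  · have : m = 0 := by omega
    subst this
    rw [pvC_nonpos base 0 (by omega)]
    norm_num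

lemma pvC_split (base : Int) (hb : 2 ≤ base) : ∀ (j : Nat) (n : Int), 0 ≤ n →
    pvC base n = pvC base (PySem.Int.mod n (base ^ j)) +
      pvC base (PySem.Int.floordiv n (base ^ j)) := by
  intro j
  induction j with
  | zero =>
    intro n hn
    have : PySem.Int.mod n (base ^ 0) = 0 := by
      rw [pow_zero, PySem.Int.mod_eq_emod_of_pos (by omega)]; simp
    rw [this, pvC_nonpos base 0 (by omega)]
    have : PySem.Int.floordiv n (base ^ 0) = n := by
      rw [pow_zero, PySem.Int.floordiv_eq_ediv_of_pos (by omega)]; simp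
    rw [this]; ring
  | succ j ih =>
    intro n hn
    have hBpos : (0:Int) < base ^ j := pow_pos (by omega) j
    have hbBpos : (0:Int) < base ^ (j + 1) := pow_pos (by omega) (j + 1)
    by_cases h : 0 < n
    · -- convert everything to ediv / emod (all divisors positive)
      rw [pvC_step base hb n h, ih (PySem.Int.floordiv n base) (fdiv_shrink base hb n h).1]
      rw [PySem.Int.floordiv_eq_ediv_of_pos (b := base) (by omega),
          PySem.Int.mod_eq_emod_of_pos (b := base) (by omega),
          PySem.Int.floordiv_eq_ediv_of_pos hBpos, PySem.Int.mod_eq_emod_of_pos hBpos,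
          PySem.Int.floordiv_eq_ediv_of_pos hbBpos, PySem.Int.mod_eq_emod_of_pos hbBpos]
      have hdd : n / base / base ^ j = n / base ^ (j + 1) := by
        rw [Int.ediv_ediv_of_nonneg (show (0:Int) ≤ base by omega), ← pow_succ']
      have hmm : n % base ^ (j + 1) % base = n % base :=
        Int.emod_emod_of_dvd n (dvd_pow_self base (by omega))
      have hmd : n % base ^ (j + 1) / base = n / base % base ^ j := by
        have e1 : n % base ^ (j + 1) = n + base * (-(base ^ j * (n / base ^ (j + 1)))) := by
          rw [Int.emod_def, pow_succ']; ring
        rw [e1, Int.add_mul_ediv_left n _ (show base ≠ 0 by omega), Int.emod_def, ← hdd]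
        ring
      have hm0 : 0 ≤ n % base ^ (j + 1) := Int.emod_nonneg n (by omega)
      by_cases hz : 0 < n % base ^ (j + 1)
      · rw [pvC_step base hb _ hz,
            PySem.Int.floordiv_eq_ediv_of_pos (b := base) (by omega),
            PySem.Int.mod_eq_emod_of_pos (b := base) (by omega), hmm, hmd, hdd]
        ring
      · have hz' : n % base ^ (j + 1) = 0 := by omega
        have h1 : n % base = 0 := by rw [← hmm, hz']; simp
        have h2 : n / base % base ^ j = 0 := by rw [← hmd, hz']; simp
        rw [hz', h1, h2, pvC_nonpos base 0 (by omega), hdd]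
        norm_num
    · have hn0 : n = 0 := by omega
      subst hn0
      have h1 : PySem.Int.mod 0 (base ^ (j + 1)) = 0 := by
        rw [PySem.Int.mod_eq_emod_of_pos hbBpos]; simp
      have h2 : PySem.Int.floordiv 0 (base ^ (j + 1)) = 0 := by
        rw [PySem.Int.floordiv_eq_ediv_of_pos hbBpos]; simp
      rw [h1, h2, pvC_nonpos base 0 (by omega)]
      ring

-- descending chain p_k :: … :: p_1 :: [base] with p_{i+1} = p_i ^ 2
def PvChain (base : Int) : List Int → Prop
  | [] => True
  | [p] => p = base
  | p :: q :: ps => p = q * q ∧ PvChain base (q :: ps)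

def pvBound (base : Int) : List Int → Int
  | [] => base
  | p :: _ => p * p

lemma chain_head_pow (base : Int) : ∀ (ps : List Int) (p : Int),
    PvChain base (p :: ps) → ∃ j : Nat, p = base ^ (j + 1) := by
  intro ps
  induction ps with
  | nil => intro p hp; exact ⟨0, by simpa [PvChain] using hp⟩
  | cons q t ih =>
    intro p hp
    obtain ⟨hpq, hq⟩ := hp
    obtain ⟨j, hj⟩ := ih q hq
    exact ⟨2 * j + 1, by rw [hpq, hj, ← pow_add]; ring_nf⟩

lemma chain_tail (base : Int) (p : Int) (ps : List Int)
    (h : PvChain base (p :: ps)) : PvChain base ps := by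
  cases ps with
  | nil => trivial
  | cons q t => exact h.2

lemma chain_bound_eq (base : Int) (p : Int) (ps : List Int)
    (h : PvChain base (p :: ps)) : pvBound base ps = p := by
  cases ps with
  | nil => simpa [PvChain, pvBound] using h.symm
  | cons q t => simp [pvBound, h.1.symm]

lemma cnt_ok (base : Int) (hb : 2 ≤ base) : ∀ (ps : List Int), PvChain base ps →
    ∀ m : Int, 0 ≤ m → m < pvBound base ps → cntAlt m ps = pvC base m := by
  intro ps
  induction ps with
  | nil =>
    intro _ m h0 h1
    rw [cntAlt, pvC_small base hb m h0 (by simpa [pvBound] using h1)]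
  | cons p ps ih =>
    intro hch m h0 h1
    have hbnd : pvBound base ps = p := chain_bound_eq base p ps hch
    obtain ⟨j, hj⟩ := chain_head_pow base ps p hch
    have hp2 : 2 ≤ p := by
      rw [hj]
      calc (2:Int) = 2 ^ 1 := by norm_num
        _ ≤ base ^ 1 := pow_le_pow_left₀ (by norm_num) hb 1
        _ ≤ base ^ (j + 1) := pow_le_pow_right₀ (by omega) (by omega)
    have htail := chain_tail base p ps hch
    by_cases hm : m < p
    · rw [cntAlt, if_pos hm]
      exact ih htail m h0 (by omega)
    · rw [cntAlt, if_neg hm]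
      have hppos : (0:Int) < p := by omega
      have h1' : m < p * p := by simpa [pvBound] using h1
      have hdnn : 0 ≤ PySem.Int.floordiv m p := by
        rw [PySem.Int.floordiv_eq_ediv_of_pos hppos]
        exact Int.ediv_nonneg h0 (by omega)
      have hdlt : PySem.Int.floordiv m p < p := by
        rw [PySem.Int.floordiv_eq_ediv_of_pos hppos]
        exact Int.ediv_lt_of_lt_mul hppos (by linarith)
      have hmnn : 0 ≤ PySem.Int.mod m p := PySem.Int.mod_nonneg m hppos
      have hmlt : PySem.Int.mod m p < p := PySem.Int.mod_lt m hppos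
      rw [ih htail _ hdnn (by omega), ih htail _ hmnn (by omega)]
      rw [hj, pvC_split base hb (j + 1) m h0, ← hj]
      ring
  
lemma build_ok (base : Int) (n : Int) :
    ∀ (f : Nat) (p : Int) (rest : List Int), PvChain base (p :: rest) → 2 ≤ p →
      n < p ^ (2 ^ f) →
      ∃ q qrest, buildPows n f p (p :: rest) = q :: qrest ∧
        PvChain base (q :: qrest) ∧ n < q * q := by
  intro f
  induction f with
  | zero =>
    intro p rest hch hp hn
    refine ⟨p, rest, by simp [buildPows], hch, ?_⟩
    have h1 : n < p := by norm_num at hn; exact hn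
    nlinarith
  | succ f ih =>
    intro p rest hch hp hn
    by_cases h : p * p ≤ n
    · rw [buildPows, if_pos h]
      have hch' : PvChain base (p * p :: p :: rest) := ⟨rfl, hch⟩
      have hn' : n < (p * p) ^ (2 ^ f) := by
        have hexp : p ^ (2 ^ (f + 1)) = (p * p) ^ (2 ^ f) := by
          rw [← sq, ← pow_mul, pow_succ']
        rw [← hexp]; exact hn
      exact ih (p * p) (p :: rest) hch' (by nlinarith) hn'
    · rw [buildPows, if_neg h]
      exact ⟨p, rest, rfl, hch, by omega⟩

lemma pvN_cast : pvN = ((7 * 512 ^ 1912 + 6 * 64 ^ 1994 : Nat) : Int) -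
    ((5 * 8 ^ 1991 + 4 * 8 ^ 1960 + 2022 : Nat) : Int) := by
  unfold pvN
  push_cast
  ring

set_option maxRecDepth 100000 in
lemma pvN_pos : 0 < pvN := by
  rw [pvN_cast]
  have h : (5 * 8 ^ 1991 + 4 * 8 ^ 1960 + 2022 : Nat) < (7 * 512 ^ 1912 + 6 * 64 ^ 1994 : Nat) := by
    decide
  omega

set_option maxRecDepth 100000 in
lemma pvN_lt : pvN < 8 ^ 6000 := by
  rw [pvN_cast]
  have hc : ((8:Int)) ^ 6000 = ((8 ^ 6000 : Nat) : Int) := by push_cast; ring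
  have h : (7 * 512 ^ 1912 + 6 * 64 ^ 1994 : Nat) <
      8 ^ 6000 + (5 * 8 ^ 1991 + 4 * 8 ^ 1960 + 2022 : Nat) := by
    decide
  rw [hc]
  omega

lemma pvC_neg (base : Int) (hbneg : base ≤ -1) (n : Int) (hn : 0 < n) :
    pvC base n = 0 := by
  unfold pvC
  rw [fbLoop_step base n.toNat n hn]
  obtain ⟨hml, hmu⟩ := PySem.Int.mod_neg_bounds (a := n) (b := base) (by omega)
  have hdneg : PySem.Int.floordiv n base < 0 := by
    by_contra h
    have h' : 0 ≤ PySem.Int.floordiv n base := by omega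
    nlinarith [PySem.Int.floordiv_mul_add_mod n base]
  rw [if_neg (by omega),
      fbLoop_nonpos base n.toNat (PySem.Int.floordiv n base) 0 (by omega)]
  ring

lemma pvC_lt8 (base : Int) (hb : 2 ≤ base) (hb7 : base ≤ 7) : ∀ (k : Nat) (n : Int),
    n.toNat ≤ k → pvC base n = 0 := by
  intro k
  induction k with
  | zero =>
    intro n hk
    exact pvC_nonpos base n (by omega)
  | succ k ih
  =>
    intro n hk
    by_cases h : 0 < n
    · rw [pvC_step base hb n h]
      have hmlt : PySem.Int.mod n base < base := PySem.Int.mod_lt n (by omega)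
      rw [if_neg (by omega)]
      obtain ⟨h0, hlt⟩ := fdiv_shrink base hb n h
      rw [ih (PySem.Int.floordiv n base) (by omega)]
      ring
    · exact pvC_nonpos base n h

-- ===== VERDICT (by name: the statement is the Claim_ definition above) =====
theorem fb_spec : Claim_equal_fb := by
  unfold Claim_equal_fb
  intro base _ hpre
  unfold Spec_fb
  obtain ⟨hb0, hb1⟩ := hpre
  show fb base = fb_alt base
  by_cases h8 : base < 8
  · rw [fb_alt, if_pos h8]
    by_cases hneg : base ≤ -1
    · exact pvC_neg base hneg pvN pvN_pos
    · have hb2 : 2 ≤ base := by omega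
      exact pvC_lt8 base hb2 (by omega) pvN.toNat pvN le_rfl
  · have h8 : (8:Int) ≤ base := by omega
    have hb2 : (2:Int) ≤ base := by omega
    have hn0 : (0:Int) ≤ pvN := le_of_lt pvN_pos
    have hlt : pvN < base ^ (2 ^ 64) := by
      calc pvN < 8 ^ 6000 := pvN_lt
        _ ≤ (8:Int) ^ (2 ^ 64) := pow_le_pow_right₀ (by norm_num) (by norm_num)
        _ ≤ base ^ (2 ^ 64) := pow_le_pow_left₀ (by norm_num) h8 _
    obtain ⟨q, qrest, heq, hch, hbnd⟩ :=
      build_ok base pvN 64 base [] (by simp [PvChain]) hb2 hlt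
    rw [fb_alt, if_neg (by omega)]
    show pvC base pvN = cntAlt pvN (buildPows pvN 64 base [base])
    rw [heq, cnt_ok base hb2 (q :: qrest) hch pvN hn0 (by simpa [pvBound] using hbnd)]
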